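-- pv_equiv track=rewrite | github.com/xiaopihai2/- | ML_Apriori/Apriori.py | createC1
-- ===== SOURCE A (Python) =====
-- def createC1(dataSet):
--     C1 = []
--     for transanction in dataSet:
--         for item in transanction:
--             if not [item] in C1:
--                 C1.append([item])
--     C1.sort()
--     #frozenset：与set不同，两者都是集合但frozenset是冻结的，不能添加，移除。可是它有哈希值，可以作为字典的key
--     return map(frozenset, C1)
-- ===== SOURCE B (Python) =====
-- def createC1(dataSet):
--     # sort-first, then one adjacent-dedup pass (instead of A's quadratic membership scans)
--     items = sorted(x for t in dataSet for x in t)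
--     uniq = []
--     prev = sentinel = object()
--     for x in items:
--         if x != prev:
--             uniq.append([x])
--             prev = x
--     return map(frozenset, uniq)
-- ===== Notes on version B (the rewrite author's own statement) =====
-- stated objective: faster
-- what changed: A builds the candidate list with a repeated linear membership scan per item and sorts afterwards; B flattens all transactions, sorts once, and removes duplicates in a single adjacent-comparison pass over the sorted sequence.
import Mathlib
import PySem

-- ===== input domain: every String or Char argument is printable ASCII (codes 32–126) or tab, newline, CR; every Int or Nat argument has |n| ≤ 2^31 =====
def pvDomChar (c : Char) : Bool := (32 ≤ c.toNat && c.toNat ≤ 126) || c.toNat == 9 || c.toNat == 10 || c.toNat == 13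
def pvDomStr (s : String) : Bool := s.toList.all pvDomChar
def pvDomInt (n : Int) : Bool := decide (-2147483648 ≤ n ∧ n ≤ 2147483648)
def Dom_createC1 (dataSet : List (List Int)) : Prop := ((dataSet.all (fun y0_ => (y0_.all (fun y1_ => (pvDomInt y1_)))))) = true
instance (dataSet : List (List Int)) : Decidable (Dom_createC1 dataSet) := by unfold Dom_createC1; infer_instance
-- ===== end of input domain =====

-- B replaces A's quadratic membership-scan-then-sort with sort-first plus one adjacent-dedup pass (objective: faster).


-- ===== PORT A =====
-- literal transliteration of A: build C1 by repeated membership scans, then sort;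
-- the final map(frozenset, C1) over singleton lists is the list of singleton collections [item].
def createC1 (dataSet : List (List Int)) : List (List Int) :=
  let C1 : List (List Int) :=
    dataSet.foldl (fun C1 transanction =>
      transanction.foldl (fun C1 item =>
        if ¬ ([item] ∈ C1) then C1 ++ [[item]] else C1) C1) []
  PySem.List.sorted C1 (fun l => l) false

-- ===== PORT B =====
-- literal transliteration of B: flatten, sort, one pass emitting each item that differs from the previous one.
def createC1_alt (dataSet : List (List Int)) : List (List Int) :=
  let items := PySem.List.sorted dataSet.flatten (fun x => x) false
  let st := items.foldl (fun (st : List (List Int) × Option Int) x =>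
      if some x ≠ st.2 then (st.1 ++ [[x]], some x) else st) ([], none)
  st.1

-- ===== PRECONDITION & SPEC =====
def Spec_createC1 (dataSet : List (List Int)) (out : List (List Int)) : Prop := out = createC1_alt dataSet
instance (dataSet : List (List Int)) (out : List (List Int)) : Decidable (Spec_createC1 dataSet out) := by unfold Spec_createC1; infer_instance

-- ===== CLAIM (what is proved, stated in full; the proofs are below) =====
def Claim_equal_createC1 : Prop := ∀ (dataSet : List (List Int)), Dom_createC1 dataSet → Spec_createC1 dataSet (createC1 dataSet)

-- ===== LEMMAS AND PROOFS =====

-- A's accumulation, written over the flattened items with a map-singleton accumulator.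
theorem foldA_map_singleton (xs : List Int) (S : List Int) :
    xs.foldl (fun C1 item => if ¬ ([item] ∈ C1) then C1 ++ [[item]] else C1) (S.map (fun x => [x]))
      = (xs.foldl PySem.Set.add S).map (fun x => [x]) := by
  induction xs generalizing S with
  | nil => rfl
  | cons x xs ih =>
    have hinj : Function.Injective (fun x : Int => [x]) := by
      intro a b h; simpa using h
    have hmem : ([x] ∈ S.map (fun x => [x])) ↔ x ∈ S := List.mem_map_of_injective hinj
    rw [List.foldl_cons, List.foldl_cons]
    by_cases hx : x ∈ S
    · have hadd : PySem.Set.add S x = S := by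
        simp [PySem.Set.add, PySem.Set.contains, hx]
      rw [hadd, if_neg (by simp [hmem.mpr hx])]
      exact ih S
    · have hadd : PySem.Set.add S x = S ++ [x] := by
        simp [PySem.Set.add, PySem.Set.contains, hx]
      rw [hadd, if_pos (fun h => hx (hmem.mp h)),
        show (List.map (fun x : Int => [x]) S ++ [[x]]) = List.map (fun x : Int => [x]) (S ++ [x]) by simp]
      exact ih (S ++ [x])

-- proof-only helper: B's adjacent-dedup pass as a structural recursion.
def adjrec : Option Int → List Int → List Int
  | _, [] => []
  | prev, x :: xs => if some x ≠ prev then x :: adjrec (some x) xs else adjrec prev xs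

theorem foldB_adjrec (xs : List Int) (acc : List (List Int)) (prev : Option Int) :
    (xs.foldl (fun (st : List (List Int) × Option Int) x =>
        if some x ≠ st.2 then (st.1 ++ [[x]], some x) else st) (acc, prev)).1
      = acc ++ (adjrec prev xs).map (fun x => [x]) := by
  induction xs generalizing acc prev with
  | nil => simp [adjrec]
  | cons x xs ih =>
    rw [List.foldl_cons]
    simp only [adjrec]
    by_cases h : some x = prev
    · rw [if_neg (fun hc => hc h), if_neg (fun hc => hc h)]
      exact ih acc prev
    · rw [if_pos h, if_pos h, ih (acc ++ [[x]]) (some x)]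
      simp

theorem mem_adjrec (xs : List Int) (prev : Option Int)
    (hs : xs.Pairwise (· ≤ ·)) (hp : ∀ y ∈ xs, ∀ p, prev = some p → p ≤ y) :
    ∀ z, z ∈ adjrec prev xs ↔ z ∈ xs ∧ some z ≠ prev := by
  induction xs generalizing prev with
  | nil => intro z; simp [adjrec]
  | cons x xs ih =>
    intro z
    obtain ⟨hx, hs'⟩ := List.pairwise_cons.mp hs
    by_cases h : some x = prev
    · subst h
      have hp' : ∀ y ∈ xs, ∀ p, (some x : Option Int) = some p → p ≤ y := by
        rintro y hy p hpe
        injection hpe with hpe; subst hpe; exact hx y hy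
      have ihz := ih (some x) hs' hp' z
      simp only [adjrec]
      rw [if_neg (by simp), ihz, List.mem_cons]
      constructor
      · rintro ⟨hz, hne⟩; exact ⟨Or.inr hz, hne⟩
      · rintro ⟨rfl | hz, hne⟩
        · exact absurd rfl hne
        · exact ⟨hz, hne⟩
    · have hp' : ∀ y ∈ xs, ∀ p, some x = some p → p ≤ y := by
        rintro y hy p hpe
        injection hpe with hpe; subst hpe; exact hx y hy
      simp only [adjrec]
      rw [if_pos h, List.mem_cons, ih (some x) hs' hp' z, List.mem_cons]
      constructor
      · rintro (rfl | ⟨hz, hne⟩)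
        · exact ⟨Or.inl rfl, h⟩
        · refine ⟨Or.inr hz, ?_⟩
          intro hpe
          rcases prev with _ | p
          · cases hpe
          · injection hpe with hpe; subst hpe
            have h1 : z ≤ x := hp x List.mem_cons_self z rfl
            have h2 : x ≤ z := hx z hz
            exact hne (by rw [le_antisymm h1 h2])
      · rintro ⟨rfl | hz, hne⟩
        · exact Or.inl rfl
        · by_cases hzx : z = x
          · exact Or.inl hzx
          · exact Or.inr ⟨hz, fun he => hzx (by injection he)⟩

theorem pairwise_adjrec (xs : List Int) (prev : Option Int)
    (hs : xs.Pairwise (· ≤ ·)) (hp : ∀ y ∈ xs, ∀ p, prev = some p → p ≤ y) :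
    (adjrec prev xs).Pairwise (· < ·) := by
  induction xs generalizing prev with
  | nil => exact List.Pairwise.nil
  | cons x xs ih =>
    obtain ⟨hx, hs'⟩ := List.pairwise_cons.mp hs
    by_cases h : some x = prev
    · have hp' : ∀ y ∈ xs, ∀ p, prev = some p → p ≤ y := fun y hy p hpe =>
        hp y (List.mem_cons_of_mem _ hy) p hpe
      simp only [adjrec]
      rw [if_neg (fun hc => hc h)]
      exact ih prev hs' hp'
    · have hp' : ∀ y ∈ xs, ∀ p, some x = some p → p ≤ y := by
        rintro y hy p hpe
        injection hpe with hpe; subst hpe; exact hx y hy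
      have htail := ih (some x) hs' hp'
      have hlt : ∀ z ∈ adjrec (some x) xs, x < z := by
        intro z hz
        have hm := (mem_adjrec xs (some x) hs' hp' z).mp hz
        have hne : z ≠ x := fun he => hm.2 (by rw [he])
        exact lt_of_le_of_ne (hx z hm.1) (Ne.symm hne)
      simp only [adjrec]
      rw [if_pos h]
      exact List.pairwise_cons.mpr ⟨hlt, htail⟩

theorem singleton_lt_iff (a b : Int) : ([a] : List Int) < [b] ↔ a < b := by
  constructor
  · intro h
    cases h with
    | rel h => exact h
    | cons h => cases h
  · intro h
    exact List.Lex.rel h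

-- ===== VERDICT (by name: the statement is the Claim_ definition above) =====
theorem createC1_spec : Claim_equal_createC1 := by
  intro dataSet _
  unfold Spec_createC1 createC1 createC1_alt
  simp only []
  rw [← List.foldl_flatten]
  set xs := dataSet.flatten with hxs
  have hA : xs.foldl (fun C1 item => if ¬ ([item] ∈ C1) then C1 ++ [[item]] else C1) []
      = (PySem.List.dedup xs).map (fun x => [x]) := by
    have := foldA_map_singleton xs []
    simpa [PySem.List.dedup, PySem.Set.ofList, PySem.Set.empty] using this
  rw [hA, foldB_adjrec]
  set ss := PySem.List.sorted xs (fun x => x) false with hss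
  have hsorted : ss.Pairwise (· ≤ ·) := PySem.List.sorted_pairwise xs (fun x => x)
  have hp0 : ∀ y ∈ ss, ∀ p, (none : Option Int) = some p → p ≤ y := by
    intro y _ p h; cases h
  set ys := adjrec none ss with hys
  have hpw : ys.Pairwise (· < ·) := pairwise_adjrec ss none hsorted hp0
  have hmem : ∀ z, z ∈ ys ↔ z ∈ xs := by
    intro z
    rw [hys, mem_adjrec ss none hsorted hp0 z]
    simp [hss, PySem.List.mem_sorted]
  have hnd : ys.Nodup := hpw.imp (fun h => ne_of_lt h)
  have hperm : (ys.map (fun x => [x])).Perm ((PySem.List.dedup xs).map (fun x => [x])) := by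
    refine List.Perm.map _ ?_
    rw [List.perm_ext_iff_of_nodup hnd (PySem.List.nodup_dedup xs)]
    intro a
    rw [hmem a, PySem.List.mem_dedup]
  have hpwmap : (ys.map (fun x : Int => [x])).Pairwise (fun a b : List Int => a < b) := by
    rw [List.pairwise_map]
    exact hpw.imp (fun h => (singleton_lt_iff _ _).mpr h)
  have hfin := PySem.List.sorted_eq_of_perm_of_pairwise_lt
      ((PySem.List.dedup xs).map (fun x => [x])) (ys.map (fun x => [x])) (fun l => l)
      hperm (by simpa using hpwmap)
  have hinst : (fun (a b : List Int) => a.decidableLT b)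
      = (LinearOrder.toDecidableLT : DecidableLT (List Int)) := by
    funext a b; exact Subsingleton.elim _ _
  rw [hinst]
  exact hfin
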